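-- pv_equiv track=rewrite | github.com/Djsurry/connect-4 | qlearning.py | findInARow
-- ===== SOURCE A (Python) =====
-- def findAdj(arr, c, r):
-- 	looking_for = arr[c][r]
-- 	adj = []
-- 	adj_coor = [
-- 		(c+1, r),
-- 		(c-1, r),
-- 		(c, r+1),
-- 		(c, r-1),
-- 		(c+1, r+1),
-- 		(c-1, r+1),
-- 		(c+1, r-1),
-- 		(c-1, r-1),
-- 	]
-- 	for coor in adj_coor:
-- 		try:
-- 			if arr[coor[0]][coor[1]] == looking_for:
-- 				adj.append(coor)
-- 		except IndexError:
-- 			continue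
-- 	return adj
--
-- def findInARow(arr, player):
-- 	found = []
-- 	for c, column in enumerate(arr):
-- 		for r, cell in enumerate(column):
-- 			if cell == player:
-- 				adj = findAdj(arr, c, r)
-- 				for i in adj:
-- 					direction = (i[0]-c, i[1]-r)
-- 					f = None
-- 					try:
-- 						if arr[i[0] + direction[0]][i[1] + direction[1]] == player:
-- 							if arr[i[0] + 2*direction[0]][i[1] + 2*direction[1]] == player:
-- 								f = [(c, r), (c+direction[0], r+direction[1]), (c+2*direction[0], r+2*direction[1]), (c+3*direction[0], r+3*direction[1])]
-- 							elif arr[i[0] + 2*direction[0]][i[1] + 2*direction[1]] == '0':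
-- 								f = [(c, r), (c+direction[0], r+direction[1]), (c+2*direction[0], r+2*direction[1])]
-- 						if f is None and arr[i[0] + 2*direction[0]][i[1] + 2*direction[1]] == '0' and arr[i[0] + direction[0]][i[1] + direction[1]] == '0':
-- 							f = [(c, r), (c+direction[0], r+direction[1])]
-- 					except IndexError:
-- 						pass
--
--
-- 					if f and sorted(f) not in found:
-- 						found.append(sorted(f))
--
-- 	# removes sublists, ie if u had [(3, 1), (3, 2), (3, 3), (3, 4)] and [(3, 2), (3, 3), (3, 4)] in found this removes the latter as it is a sublist
-- 	to_remove = []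
-- 	for i in found:
-- 		for j in found:
-- 			if len(j) > len(i):
-- 				good = True
-- 				for t in i:
-- 					if t not in j:
-- 						good = False
-- 						break
-- 				if good:
-- 					to_remove.append(i)
--
--
-- 	return [n for n in found if n not in to_remove]
-- ===== SOURCE B (Python) =====
-- _DIRS = [(1, 0), (-1, 0), (0, 1), (0, -1), (1, 1), (-1, 1), (1, -1), (-1, -1)]
--
-- def _get(arr, x, y):
-- 	try:
-- 		return arr[x][y]
-- 	except IndexError:
-- 		return None
--
-- def _line_len(arr, player, c, r, dc, dr):
-- 	ray = (_get(arr, c+dc, r+dr), _get(arr, c+2*dc, r+2*dr), _get(arr, c+3*dc, r+3*dr))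
-- 	if ray == (player, player, player):
-- 		return 4
-- 	if ray == (player, player, '0'):
-- 		return 3
-- 	if ray == (player, '0', '0'):
-- 		return 2
-- 	return None
--
-- def findInARow(arr, player):
-- 	# stage 1: stream the canonical keys of all lines, dedup by dict insertion order
-- 	keys = {}
-- 	for c, column in enumerate(arr):
-- 		for r, cell in enumerate(column):
-- 			if cell != player:
-- 				continue
-- 			for dc, dr in _DIRS:
-- 				n = _line_len(arr, player, c, r, dc, dr)
-- 				if n is None:
-- 					continue
-- 				cells = [(c + k*dc, r + k*dr) for k in range(n)]
-- 				keys[tuple(cells) if (dc, dr) > (0, 0) else tuple(reversed(cells))] = None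
-- 	# stage 2: a key is dominated iff one of its O(1) collinear extensions is itself a key
-- 	out = []
-- 	for t in keys:
-- 		(x0, y0), (x1, y1) = t[0], t[1]
-- 		sx, sy = x1 - x0, y1 - y0
-- 		covered = any(
-- 			tuple((x0 + (k - sh)*sx, y0 + (k - sh)*sy) for k in range(m)) in keys
-- 			for m in range(len(t) + 1, 5)
-- 			for sh in range(m - len(t) + 1))
-- 		if not covered:
-- 			out.append(list(t))
-- 	return out
-- ===== Notes on version B (the rewrite author's own statement) =====
-- stated objective: alternative
-- what changed: B drops A's findAdj neighbour pass and nested try/except probing in favour of prefetching each direction's 3-cell ray and matching it against three literal patterns, builds each line directly in canonical order instead of calling sorted(), dedups through dict insertion order instead of a linear 'not in found' scan, and replaces A's quadratic all-pairs subset-removal loop by O(1) dict lookups of each line's at-most-five collinear extensions (a shorter stored line is a sublist of a longer one exactly when that longer line is one of its contiguous collinear extensions).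
import Mathlib
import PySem

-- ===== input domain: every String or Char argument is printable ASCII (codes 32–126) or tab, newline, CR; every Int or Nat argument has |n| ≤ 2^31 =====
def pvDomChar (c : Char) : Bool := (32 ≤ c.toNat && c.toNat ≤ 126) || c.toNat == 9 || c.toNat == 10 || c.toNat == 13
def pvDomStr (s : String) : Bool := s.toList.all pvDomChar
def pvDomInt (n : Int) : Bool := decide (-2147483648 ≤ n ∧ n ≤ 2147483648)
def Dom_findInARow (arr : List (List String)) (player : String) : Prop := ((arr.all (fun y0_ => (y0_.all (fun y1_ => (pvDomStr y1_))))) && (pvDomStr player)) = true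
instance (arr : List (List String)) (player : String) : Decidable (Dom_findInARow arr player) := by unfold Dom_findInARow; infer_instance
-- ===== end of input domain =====

-- B replaces A's findAdj neighbour scan + nested try/except classification by a prefetched
-- 3-cell ray matched against three literal patterns, dedups via dict insertion order instead of
-- A's linear 'not in found' scan, and replaces A's quadratic all-pairs sublist removal by O(1)
-- lookups of each line's few collinear extensions; the return value is proved identical.

-- ===== PORT A =====
-- arr[x][y] under a try/except IndexError: none = IndexError, negative indices wrap (Python-exact via pyGet?)
def aCell? (arr : List (List String)) (x y : Int) : Option String :=
  match PySem.List.pyGet? arr x with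
  | none => none
  | some row => PySem.List.pyGet? row y

def findAdj (arr : List (List String)) (c r : Int) : List (Int × Int) :=
  -- looking_for = arr[c][r]: in range at every call site of findAdj, so pyGetD is exact here
  let lookingFor := PySem.List.pyGetD (PySem.List.pyGetD arr c []) r ""
  let adjCoor : List (Int × Int) :=
    [(c+1, r), (c-1, r), (c, r+1), (c, r-1), (c+1, r+1), (c-1, r+1), (c+1, r-1), (c-1, r-1)]
  adjCoor.foldl (fun adj coor =>
    match aCell? arr coor.1 coor.2 with
    | none => adj                     -- except IndexError: continue
    | some v => if v = lookingFor then adj ++ [coor] else adj) []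

-- the body of A's try: block (f is never an empty list, so `if f` = `f is not None`)
def aTryF (arr : List (List String)) (player : String) (c r : Int) (i d : Int × Int) :
    Option (List (Int × Int)) :=
  match aCell? arr (i.1 + d.1) (i.2 + d.2) with
  | none => none                      -- IndexError on the first lookup
  | some v2 =>
    if v2 = player then
      match aCell? arr (i.1 + 2*d.1) (i.2 + 2*d.2) with
      | none => none                  -- IndexError inside the nested if
      | some v3 =>
        if v3 = player then
          some [(c, r), (c+d.1, r+d.2), (c+2*d.1, r+2*d.2), (c+3*d.1, r+3*d.2)]
        else if v3 = "0" then
          some [(c, r), (c+d.1, r+d.2), (c+2*d.1, r+2*d.2)]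
        else none                     -- second if: arr[i+2d] == '0' is False
    else
      match aCell? arr (i.1 + 2*d.1) (i.2 + 2*d.2) with
      | none => none                  -- IndexError in the second if's first conjunct
      | some v3 => if v3 = "0" ∧ v2 = "0" then some [(c, r), (c+d.1, r+d.2)] else none

def findInARow (arr : List (List String)) (player : String) : List (List (Int × Int)) :=
  let found := (PySem.List.enumerate arr 0).foldl (fun found cp =>
    (PySem.List.enumerate cp.2 0).foldl (fun found rp =>
      if rp.2 = player then
        (findAdj arr cp.1 rp.1).foldl (fun found i =>
          let d := (i.1 - cp.1, i.2 - rp.1)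
          match aTryF arr player cp.1 rp.1 i d with
          | none => found
          | some f =>
            -- sorted(f): Python sorts tuples lexicographically (PySem.List.sorted2)
            let s := PySem.List.sorted2 f (fun p => p.1) (fun p => p.2) false
            if s ∈ found then found else found ++ [s]) found
      else found) found) []
  let toRemove := found.foldl (fun tr i =>
    found.foldl (fun tr j =>
      if i.length < j.length then
        -- the good-loop over t in i computes exactly this conjunction
        if i.all (fun t => j.contains t) then tr ++ [i] else tr
      else tr) tr) []
  found.filter (fun n => decide (n ∉ toRemove))

-- ===== PORT B =====
-- _get: the same try/except read B's Python uses
def bGet (arr : List (List String)) (x y : Int) : Option String :=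
  match PySem.List.pyGet? arr x with
  | none => none
  | some row => PySem.List.pyGet? row y

-- _line_len: prefetch the 3-cell ray, match it against the three patterns (None = Python None)
def bLineLen (arr : List (List String)) (player : String) (c r dc dr : Int) : Option Int :=
  let ray := (bGet arr (c+dc) (r+dr), bGet arr (c+2*dc) (r+2*dr), bGet arr (c+3*dc) (r+3*dr))
  if ray = (some player, some player, some player) then some 4
  else if ray = (some player, some player, some "0") then some 3
  else if ray = (some player, some "0", some "0") then some 2
  else none

def bDirs : List (Int × Int) :=
  [(1, 0), (-1, 0), (0, 1), (0, -1), (1, 1), (-1, 1), (1, -1), (-1, -1)]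

def findInARow_alt (arr : List (List String)) (player : String) : List (List (Int × Int)) :=
  let keys := (PySem.List.pyRange 0 (PySem.List.len arr) 1).foldl (fun keys c =>
    let column := PySem.List.pyGetD arr c []
    (PySem.List.pyRange 0 (PySem.List.len column) 1).foldl (fun keys r =>
      if PySem.List.pyGetD column r "" ≠ player then keys
      else bDirs.foldl (fun keys dd =>
        match bLineLen arr player c r dd.1 dd.2 with
        | none => keys
        | some n =>
          let cells := (PySem.List.pyRange 0 n 1).map (fun k => (c + k*dd.1, r + k*dd.2))
          keys.insert (if dd.1 > 0 ∨ (dd.1 = 0 ∧ dd.2 > 0) then cells else cells.reverse) ())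
        keys) keys)
    (PySem.Dict.empty : PySem.Dict (List (Int × Int)) Unit)
  keys.keys.foldl (fun out t =>
    let p0 := PySem.List.pyGetD t 0 (0, 0)
    let p1 := PySem.List.pyGetD t 1 (0, 0)
    let s := (p1.1 - p0.1, p1.2 - p0.2)
    let covered := (PySem.List.pyRange ((t.length : Int) + 1) 5 1).any (fun m =>
      (PySem.List.pyRange 0 (m - (t.length : Int) + 1) 1).any (fun sh =>
        (keys.get? ((PySem.List.pyRange 0 m 1).map
          (fun k => (p0.1 + (k - sh)*s.1, p0.2 + (k - sh)*s.2)))).isSome))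
    if covered then out else out ++ [t]) []

-- ===== PRECONDITION & SPEC =====
def Spec_findInARow (arr : List (List String)) (player : String) (out : List (List (Int × Int))) : Prop := out = findInARow_alt arr player
instance (arr : List (List String)) (player : String) (out : List (List (Int × Int))) : Decidable (Spec_findInARow arr player out) := by unfold Spec_findInARow; infer_instance

-- ===== CLAIM (what is proved, stated in full; the proofs are below) =====
def Claim_equal_findInARow : Prop := ∀ (arr : List (List String)) (player : String), Dom_findInARow arr player → Spec_findInARow arr player (findInARow arr player)

-- ===== LEMMAS AND PROOFS =====

-- proof-side names for the two phases of each port (definitionally equal to the ports)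
def aP1 (arr : List (List String)) (player : String) : List (List (Int × Int)) :=
  (PySem.List.enumerate arr 0).foldl (fun found cp =>
    (PySem.List.enumerate cp.2 0).foldl (fun found rp =>
      if rp.2 = player then
        (findAdj arr cp.1 rp.1).foldl (fun found i =>
          let d := (i.1 - cp.1, i.2 - rp.1)
          match aTryF arr player cp.1 rp.1 i d with
          | none => found
          | some f =>
            let s := PySem.List.sorted2 f (fun p => p.1) (fun p => p.2) false
            if s ∈ found then found else found ++ [s]) found
      else found) found) []

def aP2 (found : List (List (Int × Int))) : List (List (Int × Int)) :=
  let toRemove := found.foldl (fun tr i =>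
    found.foldl (fun tr j =>
      if i.length < j.length then
        if i.all (fun t => j.contains t) then tr ++ [i] else tr
      else tr) tr) []
  found.filter (fun n => decide (n ∉ toRemove))

lemma findInARow_decomp (arr : List (List String)) (player : String) :
    findInARow arr player = aP2 (aP1 arr player) := rfl

def bKeysD (arr : List (List String)) (player : String) : PySem.Dict (List (Int × Int)) Unit :=
  (PySem.List.pyRange 0 (PySem.List.len arr) 1).foldl (fun (keys : PySem.Dict (List (Int × Int)) Unit) (c : Int) =>
    let column := PySem.List.pyGetD arr c []
    (PySem.List.pyRange 0 (PySem.List.len column) 1).foldl (fun keys r =>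
      if PySem.List.pyGetD column r "" ≠ player then keys
      else bDirs.foldl (fun keys (dd : Int × Int) =>
        match bLineLen arr player c r dd.1 dd.2 with
        | none => keys
        | some n =>
          let cells := (PySem.List.pyRange 0 n 1).map (fun k => (c + k*dd.1, r + k*dd.2))
          keys.insert (if dd.1 > 0 ∨ (dd.1 = 0 ∧ dd.2 > 0) then cells else cells.reverse) ())
        keys) keys)
    (PySem.Dict.empty : PySem.Dict (List (Int × Int)) Unit)

def extOf (t : List (Int × Int)) (m sh : Int) : List (Int × Int) :=
  let p0 := PySem.List.pyGetD t 0 (0, 0)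
  let p1 := PySem.List.pyGetD t 1 (0, 0)
  let s := (p1.1 - p0.1, p1.2 - p0.2)
  (PySem.List.pyRange 0 m 1).map (fun k => (p0.1 + (k - sh)*s.1, p0.2 + (k - sh)*s.2))

def bCovered (keys : PySem.Dict (List (Int × Int)) Unit) (t : List (Int × Int)) : Bool :=
  (PySem.List.pyRange ((t.length : Int) + 1) 5 1).any (fun m =>
    (PySem.List.pyRange 0 (m - (t.length : Int) + 1) 1).any (fun sh =>
      (keys.get? (extOf t m sh)).isSome))

def bP2 (keys : PySem.Dict (List (Int × Int)) Unit) : List (List (Int × Int)) :=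
  keys.keys.foldl (fun out t => if bCovered keys t then out else out ++ [t]) []

lemma findInARow_alt_decomp (arr : List (List String)) (player : String) :
    findInARow_alt arr player = bP2 (bKeysD arr player) := rfl

-- arithmetic progressions of cells, the shape every stored line has
def AP (a s : Int × Int) (n : Int) : List (Int × Int) :=
  (PySem.List.pyRange 0 n 1).map (fun k => (a.1 + k*s.1, a.2 + k*s.2))

def S4 : List (Int × Int) := [(1, 0), (0, 1), (1, 1), (1, -1)]

def IsLine (t : List (Int × Int)) : Prop :=
  ∃ a s n, s ∈ S4 ∧ ((n : Int) = 2 ∨ n = 3 ∨ n = 4) ∧ t = AP a s n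

def keyOf (c r : Int) (dd : Int × Int) (n : Int) : List (Int × Int) :=
  if dd.1 > 0 ∨ (dd.1 = 0 ∧ dd.2 > 0) then AP (c, r) dd n else (AP (c, r) dd n).reverse

def bCand (arr : List (List String)) (player : String) (c r : Int) (dd : Int × Int) :
    Option (List (Int × Int)) :=
  (bLineLen arr player c r dd.1 dd.2).map (keyOf c r dd)

lemma AP2 (c r : Int) (s : Int × Int) : AP (c, r) s 2 = [(c, r), (c + s.1, r + s.2)] := by
  have h : PySem.List.pyRange 0 2 1 = [0, 1] := by decide
  simp [AP, h]

lemma AP3 (c r : Int) (s : Int × Int) :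
    AP (c, r) s 3 = [(c, r), (c + s.1, r + s.2), (c + 2*s.1, r + 2*s.2)] := by
  have h : PySem.List.pyRange 0 3 1 = [0, 1, 2] := by decide
  simp [AP, h]

lemma AP4 (c r : Int) (s : Int × Int) :
    AP (c, r) s 4 = [(c, r), (c + s.1, r + s.2), (c + 2*s.1, r + 2*s.2), (c + 3*s.1, r + 3*s.2)] := by
  have h : PySem.List.pyRange 0 4 1 = [0, 1, 2, 3] := by decide
  simp [AP, h]

-- the comparator sorted2 uses for the key pair (fst, snd)
def lexlt (a b : Int × Int) : Bool :=
  decide (a.1 < b.1) || (!decide (b.1 < a.1) && decide (a.2 < b.2))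

lemma insertBy_front {α : Type} (before : α → α → Bool) (x : α) (acc : List α)
    (h : ∀ y ∈ acc, before x y = true) :
    PySem.List.insertBy before x acc = x :: acc := by
  cases acc with
  | nil => rfl
  | cons y ys => simp [PySem.List.insertBy, h y (by simp)]

lemma foldl_insertBy_asc {α : Type} (before : α → α → Bool) :
    ∀ (xs acc : List α), xs.Pairwise (fun a b => before b a = false) →
    (∀ x ∈ xs, ∀ y ∈ acc, before x y = false) →
    xs.foldl (fun acc x => PySem.List.insertBy before x acc) acc = acc ++ xs := by
  intro xs
  induction xs with
  | nil => simp
  | cons x xs ih =>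
    intro acc hp hxy
    simp only [List.foldl_cons]
    rw [PySem.List.insertBy_of_forall_not_before _ _ _ (hxy x (by simp))]
    rw [ih (acc ++ [x]) (List.Pairwise.of_cons hp) ?_]
    · simp
    · intro z hz y hy
      rcases List.mem_append.mp hy with h | h
      · exact hxy z (by simp [hz]) y h
      · have : y = x := by simpa using h
        subst this
        exact (List.pairwise_cons.mp hp).1 z hz

lemma foldl_insertBy_desc {α : Type} (before : α → α → Bool) :
    ∀ (xs acc : List α), xs.Pairwise (fun a b => before b a = true) →
    (∀ x ∈ xs, ∀ y ∈ acc, before x y = true) →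
    xs.foldl (fun acc x => PySem.List.insertBy before x acc) acc = xs.reverse ++ acc := by
  intro xs
  induction xs with
  | nil => simp
  | cons x xs ih =>
    intro acc hp hxy
    simp only [List.foldl_cons]
    rw [insertBy_front before x acc (hxy x (by simp))]
    rw [ih (x :: acc) (List.Pairwise.of_cons hp) ?_]
    · simp
    · intro z hz y hy
      rcases List.mem_cons.mp hy with h | h
      · subst h
        exact (List.pairwise_cons.mp hp).1 z hz
      · exact hxy z (by simp [hz]) y h

lemma sorted2_asc (xs : List (Int × Int))
    (h : xs.Pairwise (fun a b => lexlt b a = false)) :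
    PySem.List.sorted2 xs (fun p => p.1) (fun p => p.2) false = xs := by
  have e : PySem.List.sorted2 xs (fun p => p.1) (fun p => p.2) false =
      xs.foldl (fun acc x => PySem.List.insertBy lexlt x acc) [] := rfl
  rw [e, foldl_insertBy_asc lexlt xs [] h (by simp)]
  simp

lemma sorted2_desc (xs : List (Int × Int))
    (h : xs.Pairwise (fun a b => lexlt b a = true)) :
    PySem.List.sorted2 xs (fun p => p.1) (fun p => p.2) false = xs.reverse := by
  have e : PySem.List.sorted2 xs (fun p => p.1) (fun p => p.2) false =
      xs.foldl (fun acc x => PySem.List.insertBy lexlt x acc) [] := rfl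
  rw [e, foldl_insertBy_desc lexlt xs [] h (by simp)]
  simp

lemma key_eq2 (c r : Int) (dd : Int × Int) (hdd : dd.1 ≠ 0 ∨ dd.2 ≠ 0) :
    PySem.List.sorted2 [(c, r), (c + dd.1, r + dd.2)] (fun p => p.1) (fun p => p.2) false =
      keyOf c r dd 2 := by
  unfold keyOf
  rw [AP2]
  by_cases hpos : dd.1 > 0 ∨ (dd.1 = 0 ∧ dd.2 > 0)
  · rw [if_pos hpos]
    apply sorted2_asc
    simp [lexlt]
    omega
  · rw [if_neg hpos]
    apply sorted2_desc
    simp [lexlt]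
    omega

lemma key_eq3 (c r : Int) (dd : Int × Int) (hdd : dd.1 ≠ 0 ∨ dd.2 ≠ 0) :
    PySem.List.sorted2 [(c, r), (c + dd.1, r + dd.2), (c + 2*dd.1, r + 2*dd.2)]
      (fun p => p.1) (fun p => p.2) false = keyOf c r dd 3 := by
  unfold keyOf
  rw [AP3]
  by_cases hpos : dd.1 > 0 ∨ (dd.1 = 0 ∧ dd.2 > 0)
  · rw [if_pos hpos]
    apply sorted2_asc
    simp [lexlt]
    omega
  · rw [if_neg hpos]
    apply sorted2_desc
    simp [lexlt]
    omega

lemma key_eq4 (c r : Int) (dd : Int × Int) (hdd : dd.1 ≠ 0 ∨ dd.2 ≠ 0) :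
    PySem.List.sorted2 [(c, r), (c + dd.1, r + dd.2), (c + 2*dd.1, r + 2*dd.2), (c + 3*dd.1, r + 3*dd.2)]
      (fun p => p.1) (fun p => p.2) false = keyOf c r dd 4 := by
  unfold keyOf
  rw [AP4]
  by_cases hpos : dd.1 > 0 ∨ (dd.1 = 0 ∧ dd.2 > 0)
  · rw [if_pos hpos]
    apply sorted2_asc
    simp [lexlt]
    omega
  · rw [if_neg hpos]
    apply sorted2_desc
    simp [lexlt]
    omega

lemma bDirs_ne (dd : Int × Int) (h : dd ∈ bDirs) : dd.1 ≠ 0 ∨ dd.2 ≠ 0 := by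
  fin_cases h <;> simp

-- A's per-direction candidate (neighbour filter + try-block + sorted) equals B's ray classification
lemma cand_eq (arr : List (List String)) (player : String) (c r : Int) (dd : Int × Int)
    (hdd : dd.1 ≠ 0 ∨ dd.2 ≠ 0) :
    (if aCell? arr (c + dd.1) (r + dd.2) = some player then
        (aTryF arr player c r (c + dd.1, r + dd.2) (dd.1, dd.2)).map
          (fun f => PySem.List.sorted2 f (fun p => p.1) (fun p => p.2) false)
      else none) = bCand arr player c r dd := by
  have e1 : c + dd.1 + dd.1 = c + 2*dd.1 := by ring
  have e2 : r + dd.2 + dd.2 = r + 2*dd.2 := by ring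
  have e3 : c + dd.1 + 2*dd.1 = c + 3*dd.1 := by ring
  have e4 : r + dd.2 + 2*dd.2 = r + 3*dd.2 := by ring
  have hbg : ∀ x y, bGet arr x y = aCell? arr x y := fun _ _ => rfl
  unfold bCand aTryF bLineLen
  dsimp only
  simp only [hbg, e1, e2, e3, e4]
  cases hv1 : aCell? arr (c + dd.1) (r + dd.2) with
  | none => simp
  | some v1 =>
    cases hv : aCell? arr (c + 2*dd.1) (r + 2*dd.2) with
    | none =>
      by_cases h1 : v1 = player <;> simp_all
    | some v2 =>
      cases hw : aCell? arr (c + 3*dd.1) (r + 3*dd.2) with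
      | none =>
        by_cases h1 : v1 = player <;> by_cases h2 : v2 = player <;>
          by_cases h5 : v2 = "0" <;> simp_all
      | some v3 =>
        by_cases h1 : v1 = player <;> by_cases h2 : v2 = player <;>
          by_cases h3 : v3 = player <;> by_cases h4 : v3 = "0" <;>
          by_cases h5 : v2 = "0" <;>
          simp_all [key_eq4 c r dd hdd, key_eq3 c r dd hdd, key_eq2 c r dd hdd]

lemma findAdj_eq_filter (arr : List (List String)) (player : String) (c r : Int)
    (hcell : PySem.List.pyGetD (PySem.List.pyGetD arr c []) r "" = player) :
    findAdj arr c r = (bDirs.map (fun dd => (c + dd.1, r + dd.2))).filter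
      (fun coor => decide (aCell? arr coor.1 coor.2 = some player)) := by
  have hmap : [(c+1, r), (c-1, r), (c, r+1), (c, r-1), (c+1, r+1), (c-1, r+1), (c+1, r-1), (c-1, r-1)]
      = bDirs.map (fun dd => (c + dd.1, r + dd.2)) := by
    simp [bDirs, Prod.ext_iff]; omega
  simp only [findAdj, hcell]
  rw [PySem.List.foldl_congr_mem _ _
    (fun adj coor => if aCell? arr coor.1 coor.2 = some player then adj ++ [coor] else adj) _ ?_]
  · rw [PySem.List.foldl_append_ite_eq_filter, hmap]
    simp
  · intro acc x _
    cases hx : aCell? arr x.1 x.2 with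
    | none => simp [hx]
    | some v =>
      by_cases hvp : v = player <;> simp [hx, hvp]

-- generic simulation between two folds over the same list
lemma foldl_sim {s t b : Type} (R : s → t → Prop) (l : List b) (fA : s → b → s) (fB : t → b → t)
    (h : ∀ sa ta x, x ∈ l → R sa ta → R (fA sa x) (fB ta x)) :
    ∀ sa ta, R sa ta → R (l.foldl fA sa) (l.foldl fB ta) := by
  induction l with
  | nil => intro sa ta hR; exact hR
  | cons x xs ih =>
    intro sa ta hR
    exact ih (fun sa ta y hy => h sa ta y (by simp [hy])) (fA sa x) (fB ta x)
      (h sa ta x (by simp) hR)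

lemma bLineLen_cases (arr : List (List String)) (player : String) (c r dc dr n : Int)
    (h : bLineLen arr player c r dc dr = some n) : n = 2 ∨ n = 3 ∨ n = 4 := by
  unfold bLineLen at h
  dsimp only at h
  split_ifs at h <;> simp_all

lemma posdir_S4 (dd : Int × Int) (h : dd ∈ bDirs)
    (hp : dd.1 > 0 ∨ (dd.1 = 0 ∧ dd.2 > 0)) : dd ∈ S4 := by
  fin_cases h <;> revert hp <;> decide

lemma negdir_S4 (dd : Int × Int) (h : dd ∈ bDirs)
    (hp : ¬(dd.1 > 0 ∨ (dd.1 = 0 ∧ dd.2 > 0))) : (-dd.1, -dd.2) ∈ S4 := by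
  fin_cases h <;> revert hp <;> decide

lemma AP_rev (c r : Int) (s : Int × Int) (n : Int) (hn : n = 2 ∨ n = 3 ∨ n = 4) :
    (AP (c, r) s n).reverse = AP (c + (n-1)*s.1, r + (n-1)*s.2) (-s.1, -s.2) n := by
  rcases hn with rfl | rfl | rfl <;>
    simp [AP2, AP3, AP4, Prod.ext_iff] <;> ring_nf <;> simp

lemma isLine_keyOf (c r : Int) (dd : Int × Int) (hdd : dd ∈ bDirs) (n : Int)
    (hn : n = 2 ∨ n = 3 ∨ n = 4) : IsLine (keyOf c r dd n) := by
  unfold keyOf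
  by_cases hpos : dd.1 > 0 ∨ (dd.1 = 0 ∧ dd.2 > 0)
  · rw [if_pos hpos]
    exact ⟨(c, r), dd, n, posdir_S4 dd hdd hpos, hn, rfl⟩
  · rw [if_neg hpos, AP_rev c r dd n hn]
    exact ⟨(c + (n-1)*dd.1, r + (n-1)*dd.2), (-dd.1, -dd.2), n,
      negdir_S4 dd hdd hpos, hn, rfl⟩

-- relation carried through phase 1: the dict's key list IS A's found list, and all keys are lines
def R1 (d : PySem.Dict (List (Int × Int)) Unit) (f : List (List (Int × Int))) : Prop :=
  d.keys = f ∧ ∀ k ∈ d.keys, IsLine k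

lemma p1_eq (arr : List (List String)) (player : String) :
    R1 (bKeysD arr player) (aP1 arr player) := by
  unfold aP1 bKeysD
  rw [PySem.List.enumerate_eq_map_pyRange arr ([] : List String), List.foldl_map]
  refine foldl_sim R1 _ _ _ ?_ _ _ ⟨by simp, by simp⟩
  intro d f c hc hR
  dsimp only
  rw [PySem.List.enumerate_eq_map_pyRange (PySem.List.pyGetD arr c []) "", List.foldl_map]
  refine foldl_sim R1 _ _ _ ?_ _ _ hR
  intro d f r hr hR
  dsimp only
  by_cases hcell : PySem.List.pyGetD (PySem.List.pyGetD arr c []) r "" = player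
  · rw [if_pos hcell, if_neg (not_not_intro hcell)]
    rw [findAdj_eq_filter arr player c r hcell, List.foldl_filter, List.foldl_map]
    refine foldl_sim R1 _ _ _ ?_ _ _ hR
    intro d f dd hdd hR
    obtain ⟨hk, hl⟩ := hR
    have hdd' := bDirs_ne dd hdd
    have hce := cand_eq arr player c r dd hdd'
    dsimp only
    simp only [add_sub_cancel_left]
    cases hbl : bLineLen arr player c r dd.1 dd.2 with
    | none =>
      have hcand : bCand arr player c r dd = none := by
        unfold bCand; rw [hbl]; rfl
      rw [hcand] at hce
      by_cases hacell : aCell? arr (c + dd.1) (r + dd.2) = some player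
      · rw [if_pos hacell] at hce
        have haf : aTryF arr player c r (c + dd.1, r + dd.2) (dd.1, dd.2) = none :=
          Option.map_eq_none_iff.mp hce
        rw [if_pos (decide_eq_true hacell), haf]
        exact ⟨hk, hl⟩
      · rw [if_neg (by simpa using hacell)]
        exact ⟨hk, hl⟩
    | some n =>
      have hcand : bCand arr player c r dd = some (keyOf c r dd n) := by
        unfold bCand; rw [hbl]; rfl
      rw [hcand] at hce
      by_cases hacell : aCell? arr (c + dd.1) (r + dd.2) = some player
      · rw [if_pos hacell] at hce
        cases haf : aTryF arr player c r (c + dd.1, r + dd.2) (dd.1, dd.2) with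
        | none => rw [haf] at hce; cases hce
        | some f0 =>
          rw [haf] at hce
          simp only [Option.map_some, Option.some.injEq] at hce
          rw [if_pos (decide_eq_true hacell)]
          dsimp only
          rw [hce]
          have hkey : (if dd.1 > 0 ∨ (dd.1 = 0 ∧ dd.2 > 0)
              then (PySem.List.pyRange 0 n 1).map (fun k => (c + k*dd.1, r + k*dd.2))
              else ((PySem.List.pyRange 0 n 1).map (fun k => (c + k*dd.1, r + k*dd.2))).reverse)
              = keyOf c r dd n := rfl
          rw [hkey]
          have hln : IsLine (keyOf c r dd n) :=
            isLine_keyOf c r dd hdd n (bLineLen_cases arr player c r dd.1 dd.2 n hbl)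
          by_cases hin : keyOf c r dd n ∈ f
          · rw [if_pos hin]
            have hcont := (PySem.Dict.contains_iff_mem_keys d _).mpr (hk ▸ hin)
            have hkeys := PySem.Dict.keys_insert_of_contains d () hcont
            exact ⟨hkeys.trans hk, fun x hx => hl x (hkeys ▸ hx)⟩
          · rw [if_neg hin]
            have hcont : d.contains (keyOf c r dd n) = false := by
              rw [← Bool.not_eq_true, PySem.Dict.contains_iff_mem_keys, hk]
              exact hin
            have hkeys := PySem.Dict.keys_insert_of_not_contains d () hcont
            refine ⟨by rw [hkeys, hk], ?_⟩
            intro x hx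
            rw [hkeys] at hx
            rcases List.mem_append.mp hx with hx' | hx'
            · exact hl x hx'
            · have : x = keyOf c r dd n := by simpa using hx'
              subst this
              exact hln
      · rw [if_neg hacell] at hce
        cases hce
  · rw [if_neg hcell, if_pos hcell]
    exact hR

lemma mem_AP (x : Int × Int) (a s : Int × Int) (n : Int) :
    x ∈ AP a s n ↔ ∃ k : Int, 0 ≤ k ∧ k < n ∧ x = (a.1 + k*s.1, a.2 + k*s.2) := by
  simp only [AP, List.mem_map, PySem.List.mem_pyRange_one]
  constructor
  · rintro ⟨k, ⟨hk0, hkn⟩, rfl⟩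
    exact ⟨k, hk0, hkn, rfl⟩
  · rintro ⟨k, hk0, hkn, rfl⟩
    exact ⟨k, ⟨hk0, hkn⟩, rfl⟩

lemma length_AP (a s : Int × Int) (n : Int) : ((AP a s n).length : Int) = max n 0 := by
  simp only [AP, List.length_map, PySem.List.length_pyRange_one]
  omega

-- a stored key determines its step from its first two cells and is the AP it looks like
lemma line_shape (t : List (Int × Int)) (h : IsLine t) :
    ∃ s n, s ∈ S4 ∧ ((n : Int) = 2 ∨ n = 3 ∨ n = 4) ∧ (t.length : Int) = n ∧
      PySem.List.pyGetD t 1 (0, 0) =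
        ((PySem.List.pyGetD t 0 (0, 0)).1 + s.1, (PySem.List.pyGetD t 0 (0, 0)).2 + s.2) ∧
      t = AP (PySem.List.pyGetD t 0 (0, 0)) s n := by
  obtain ⟨a, s, n, hs, hn, rfl⟩ := h
  have hn2 : (2 : Int) ≤ n := by rcases hn with rfl | rfl | rfl <;> norm_num
  have h0 : PySem.List.pyGetD (AP a s n) 0 (0, 0) = a := by
    unfold AP
    rw [PySem.List.pyGetD_map_pyRange_of_nonneg _ _ _ _ le_rfl (by omega)]
    simp
  have h1 : PySem.List.pyGetD (AP a s n) 1 (0, 0) = (a.1 + s.1, a.2 + s.2) := by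
    unfold AP
    rw [PySem.List.pyGetD_map_pyRange_of_nonneg _ _ _ _ (by norm_num) (by omega)]
    simp
  refine ⟨s, n, hs, hn, ?_, ?_, ?_⟩
  · rw [length_AP]; omega
  · rw [h0, h1]
  · rw [h0]


lemma step_det (s u : Int × Int) (hs : s ∈ S4) (hu : u ∈ S4) (q : Int)
    (h1 : s.1 = q*u.1) (h2 : s.2 = q*u.2) : s = u ∧ q = 1 := by
  simp only [S4, List.mem_cons, List.not_mem_nil, or_false] at hs hu
  rcases hs with rfl | rfl | rfl | rfl <;> rcases hu with rfl | rfl | rfl | rfl <;>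
    dsimp only at h1 h2 <;>
    first
    | exact ⟨rfl, by omega⟩
    | (exfalso; omega)

lemma cancel_S4 (s : Int × Int) (hs : s ∈ S4) (p q : Int)
    (h1 : p*s.1 = q*s.1) (h2 : p*s.2 = q*s.2) : p = q := by
  simp only [S4, List.mem_cons, List.not_mem_nil, or_false] at hs
  rcases hs with rfl | rfl | rfl | rfl <;> dsimp only at h1 h2 <;> omega

-- forward: a strict superset stored in found is one of B's collinear extensions
lemma superset_ext (t j : List (Int × Int)) (hlt : IsLine t) (hlj : IsLine j)
    (hlen : t.length < j.length) (hsub : ∀ x ∈ t, x ∈ j) :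
    ∃ m sh : Int, (t.length : Int) + 1 ≤ m ∧ m < 5 ∧ 0 ≤ sh ∧ sh < m - (t.length : Int) + 1 ∧
      extOf t m sh = j := by
  obtain ⟨s, n, hs, hn, hlent, hp1, hAPt⟩ := line_shape t hlt
  obtain ⟨b, u, m', hu, hm', rfl⟩ := hlj
  have hlenj : ((AP b u m').length : Int) = m' := by
    rw [length_AP]; rcases hm' with rfl | rfl | rfl <;> norm_num
  set a := PySem.List.pyGetD t 0 (0, 0) with ha
  -- the first two cells of t are in j
  have hmem : ∀ k : Int, 0 ≤ k → k < n → ∃ q : Int, 0 ≤ q ∧ q < m' ∧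
      (a.1 + k*s.1, a.2 + k*s.2) = (b.1 + q*u.1, b.2 + q*u.2) := by
    intro k hk0 hkn
    have : (a.1 + k*s.1, a.2 + k*s.2) ∈ t := by
      rw [hAPt, mem_AP]; exact ⟨k, hk0, hkn, rfl⟩
    have := hsub _ this
    rw [mem_AP] at this
    obtain ⟨q, hq0, hqm, hq⟩ := this
    exact ⟨q, hq0, hqm, hq⟩
  obtain ⟨k0, hk00, hk0m, hk0e⟩ := hmem 0 le_rfl (by omega)
  obtain ⟨k1, hk10, hk1m, hk1e⟩ := hmem 1 (by norm_num) (by omega)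
  simp only [Prod.ext_iff] at hk0e hk1e
  -- the step of t equals the step of j
  have hsu : s = u ∧ k1 - k0 = 1 := by
    apply step_det s u hs hu (k1 - k0)
    · linear_combination hk1e.1 - hk0e.1
    · linear_combination hk1e.2 - hk0e.2
  obtain ⟨rfl, -⟩ := hsu
  -- the last cell of t pins the containment window
  obtain ⟨k2, hk20, hk2m, hk2e⟩ := hmem (n - 1) (by omega) (by omega)
  simp only [Prod.ext_iff] at hk2e
  have hk2 : k2 = k0 + (n - 1) := by
    apply cancel_S4 s hs
    · first
      | linear_combination hk2e.1 - hk0e.1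
      | linear_combination hk0e.1 - hk2e.1
    · first
      | linear_combination hk2e.2 - hk0e.2
      | linear_combination hk0e.2 - hk2e.2
  refine ⟨m', k0, ?_, ?_, hk00, ?_, ?_⟩
  · omega
  · rcases hm' with rfl | rfl | rfl <;> norm_num
  · omega
  · -- extOf t m' k0 = AP b s m'
    unfold extOf
    rw [← ha, hp1]
    unfold AP
    apply List.map_congr_left
    intro k _
    dsimp only
    simp only [Prod.ext_iff]
    constructor
    · linear_combination hk0e.1
    · linear_combination hk0e.2

-- backward: every in-range extension that is stored is a strict superset
lemma ext_superset (t : List (Int × Int)) (hlt : IsLine t) (m sh : Int)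
    (hm1 : (t.length : Int) + 1 ≤ m) (_hm2 : m < 5) (hsh0 : 0 ≤ sh)
    (hsh1 : sh < m - (t.length : Int) + 1) :
    t.length < (extOf t m sh).length ∧ ∀ x ∈ t, x ∈ extOf t m sh := by
  obtain ⟨s, n, hs, hn, hlent, hp1, hAPt⟩ := line_shape t hlt
  set a := PySem.List.pyGetD t 0 (0, 0) with ha
  have hext : extOf t m sh =
      (PySem.List.pyRange 0 m 1).map (fun k => (a.1 + (k - sh)*s.1, a.2 + (k - sh)*s.2)) := by
    unfold extOf
    rw [← ha, hp1]
    apply List.map_congr_left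
    intro k _
    dsimp only
    simp only [Prod.ext_iff]
    constructor <;> ring
  constructor
  · rw [hext]
    have : ((PySem.List.pyRange 0 m 1).map
        (fun k => (a.1 + (k - sh)*s.1, a.2 + (k - sh)*s.2))).length = (m - 0).toNat := by
      rw [List.length_map, PySem.List.length_pyRange_one]
    omega
  · intro x hx
    rw [hAPt, mem_AP] at hx
    obtain ⟨k, hk0, hkn, rfl⟩ := hx
    rw [hext]
    simp only [List.mem_map, PySem.List.mem_pyRange_one]
    refine ⟨sh + k, ⟨by omega, by omega⟩, ?_⟩
    simp only [Prod.ext_iff]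
    constructor <;> ring

lemma mem_toRemove (found : List (List (Int × Int))) (x : List (Int × Int)) :
    x ∈ (found.foldl (fun tr i => found.foldl (fun tr j =>
          if i.length < j.length then
            if i.all (fun t => j.contains t) then tr ++ [i] else tr
          else tr) tr) [])
      ↔ x ∈ found ∧ ∃ j ∈ found,
          (decide (x.length < j.length) && x.all (fun t => j.contains t)) = true := by
  have hinner : ∀ (i : List (Int × Int)) (tr : List (List (Int × Int))),
      found.foldl (fun tr j =>
          if i.length < j.length then
            if i.all (fun t => j.contains t) then tr ++ [i] else tr
          else tr) tr
      = tr ++ (found.filter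
          (fun j => decide (i.length < j.length) && i.all (fun t => j.contains t))).map
            (fun _ => i) := by
    intro i tr
    rw [PySem.List.foldl_congr_mem _ _
      (fun tr j => if (decide (i.length < j.length) && i.all (fun t => j.contains t)) = true
        then tr ++ [i] else tr) _ ?_]
    · exact PySem.List.foldl_append_if _ _ found tr
    · intro acc j _
      split_ifs <;> simp_all
  rw [PySem.List.foldl_congr_mem _ _
    (fun tr i => tr ++ (found.filter
        (fun j => decide (i.length < j.length) && i.all (fun t => j.contains t))).map
          (fun _ => i)) _ (fun acc i _ => hinner i acc)]
  rw [PySem.List.foldl_append_eq_flatMap]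
  simp only [List.nil_append, List.mem_flatMap, List.mem_map, List.mem_filter]
  constructor
  · rintro ⟨i, hi, j, ⟨hj, hp⟩, hx⟩
    subst hx
    exact ⟨hi, j, hj, hp⟩
  · rintro ⟨hx, j, hj, hp⟩
    exact ⟨x, hx, j, ⟨hj, hp⟩, rfl⟩

lemma kept_eq (found : List (List (Int × Int))) (q : List (Int × Int) → Bool) :
    found.foldl (fun kept i => if q i then kept else kept ++ [i]) [] =
      found.filter (fun i => !q i) := by
  rw [PySem.List.foldl_congr_mem _ _
    (fun kept i => if (!q i) = true then kept ++ [i] else kept) _ ?_]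
  · rw [PySem.List.foldl_append_if_eq_filter]
    simp
  · intro acc i _
    by_cases h : q i <;> simp [h]

lemma phase2 (keys : PySem.Dict (List (Int × Int)) Unit)
    (hline : ∀ k ∈ keys.keys, IsLine k) :
    aP2 keys.keys = bP2 keys := by
  unfold aP2 bP2
  rw [kept_eq]
  apply List.filter_congr
  intro t ht
  have key : (t ∈ keys.keys.foldl (fun tr i => keys.keys.foldl (fun tr j =>
        if i.length < j.length then
          if i.all (fun t => j.contains t) then tr ++ [i] else tr
        else tr) tr) []) ↔ bCovered keys t = true := by
    rw [mem_toRemove]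
    unfold bCovered
    simp only [List.any_eq_true, PySem.List.mem_pyRange_one]
    constructor
    · rintro ⟨-, j, hj, hp⟩
      simp only [Bool.and_eq_true, decide_eq_true_eq, List.all_eq_true] at hp
      obtain ⟨hlen, hall⟩ := hp
      obtain ⟨m, sh, hm1, hm2, hsh0, hsh1, hext⟩ :=
        superset_ext t j (hline t ht) (hline j hj) hlen
          (fun x hx => by simpa using hall x hx)
      refine ⟨m, ⟨hm1, hm2⟩, sh, ⟨hsh0, hsh1⟩, ?_⟩
      rw [hext, ← PySem.Dict.contains_eq_isSome_get?]
      exact (PySem.Dict.contains_iff_mem_keys _ _).mpr hj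
    · rintro ⟨m, ⟨hm1, hm2⟩, sh, ⟨hsh0, hsh1⟩, hsome⟩
      have hj : extOf t m sh ∈ keys.keys := by
        rw [← PySem.Dict.contains_eq_isSome_get?] at hsome
        exact (PySem.Dict.contains_iff_mem_keys _ _).mp hsome
      obtain ⟨hlen, hall⟩ := ext_superset t (hline t ht) m sh hm1 hm2 hsh0 hsh1
      refine ⟨ht, extOf t m sh, hj, ?_⟩
      simp only [Bool.and_eq_true, decide_eq_true_eq, List.all_eq_true]
      exact ⟨hlen, fun x hx => by simpa using hall x hx⟩
  cases hb : bCovered keys t <;> simp_all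

theorem findInARow_agree (arr : List (List String)) (player : String) :
    findInARow arr player = findInARow_alt arr player := by
  obtain ⟨hkeys, hline⟩ := p1_eq arr player
  rw [findInARow_decomp, findInARow_alt_decomp, ← hkeys]
  exact phase2 (bKeysD arr player) hline

-- ===== VERDICT (by name: the statement is the Claim_ definition above) =====
theorem findInARow_spec : Claim_equal_findInARow := by
  intro arr player _
  unfold Spec_findInARow
  exact findInARow_agree arr player
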